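-- pv_equiv track=rewrite | github.com/a-brandon/practice | edabit/elastic_words.py | odd_stretch
-- ===== SOURCE A (Python) =====
-- def odd_stretch(txt):
--     s, indexes = [], []
--     pivot = len(txt) // 2
--
--     for i, ch in enumerate(txt):
--         if i <= pivot:
--             s.append((i + 1) * ch)
--             indexes.append(i + 1)
--         else:
--             indexes[-1] -= 1
--             s.append(indexes[-1] * ch)
--
--     return ''.join(s)
-- ===== SOURCE B (Python) =====
-- def odd_stretch(txt):
--     pivot = len(txt) // 2
--     return ''.join(ch * (pivot + 1 - abs(i - pivot)) for i, ch in enumerate(txt))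
-- ===== Notes on version B (the rewrite author's own statement) =====
-- stated objective: simpler
-- what changed: Replaces A's stateful auxiliary list of decremented counts and its pivot branch with a single branchless closed-form repeat count pivot+1-abs(i-pivot) per character, joined in one comprehension.
import Mathlib
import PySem

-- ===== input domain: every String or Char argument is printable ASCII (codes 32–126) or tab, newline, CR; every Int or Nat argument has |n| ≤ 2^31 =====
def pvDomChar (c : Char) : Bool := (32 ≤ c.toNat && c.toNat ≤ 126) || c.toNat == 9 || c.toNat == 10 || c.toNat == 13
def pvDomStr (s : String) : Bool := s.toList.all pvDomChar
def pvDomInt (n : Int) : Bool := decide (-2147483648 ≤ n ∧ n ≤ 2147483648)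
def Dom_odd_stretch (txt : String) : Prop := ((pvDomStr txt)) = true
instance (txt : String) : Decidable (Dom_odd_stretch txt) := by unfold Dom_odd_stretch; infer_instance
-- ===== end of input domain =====

-- B replaces A's stateful decremented 'indexes' list with the closed-form count pivot+1-|i-pivot| (simpler; same cost).

-- ===== PORT A =====
-- loop body of A; indexes[-1] is total here via getD 0: Python's IndexError case (empty indexes with i > pivot) is unreachable since pivot ≥ 0
def oddStretchStepA (pivot : Int) (st : List (List Char) × List Int) (p : Int × Char) :
    List (List Char) × List Int :=
  if p.1 ≤ pivot then
    (st.1 ++ [PySem.List.pyRepeat [p.2] (p.1 + 1)], st.2 ++ [p.1 + 1])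
  else
    let j := PySem.List.pyGetD st.2 (-1) 0 - 1
    (st.1 ++ [PySem.List.pyRepeat [p.2] j], st.2.dropLast ++ [j])

def odd_stretch (txt : String) : String :=
  let cs := txt.toList
  let pivot : Int := PySem.Int.floordiv (cs.length : Int) 2
  let st := (PySem.List.enumerate cs 0).foldl (oddStretchStepA pivot) ([], [])
  String.ofList (PySem.Chars.join [] st.1)

-- ===== PORT B =====
def odd_stretch_alt (txt : String) : String :=
  let cs := txt.toList
  let pivot : Int := PySem.Int.floordiv (cs.length : Int) 2
  String.ofList (PySem.Chars.join []
    ((PySem.List.enumerate cs 0).map (fun p => PySem.List.pyRepeat [p.2] (pivot + 1 - |p.1 - pivot|))))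

-- ===== PRECONDITION & SPEC =====
def Spec_odd_stretch (txt : String) (out : String) : Prop := out = odd_stretch_alt txt
instance (txt : String) (out : String) : Decidable (Spec_odd_stretch txt out) := by unfold Spec_odd_stretch; infer_instance

-- ===== CLAIM (what is proved, stated in full; the proofs are below) =====
def Claim_equal_odd_stretch : Prop := ∀ (txt : String), Dom_odd_stretch txt → Spec_odd_stretch txt (odd_stretch txt)

-- ===== LEMMAS AND PROOFS =====

theorem pyGetD_append_singleton_neg_one {α : Type} (xs : List α) (a : α) (d : α) :
    PySem.List.pyGetD (xs ++ [a]) (-1) d = a := by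
  simp [pysem, PySem.List.pyGetD]

theorem oddStretch_loop (pivot : Int) (rest : List Char) :
    ∀ (k : Int) (s : List (List Char)) (idx : List Int),
    (pivot < k → PySem.List.pyGetD idx (-1) 0 = 2 * pivot + 2 - k) →
    ((PySem.List.enumerate rest k).foldl (oddStretchStepA pivot) (s, idx)).1
      = s ++ (PySem.List.enumerate rest k).map
          (fun p => PySem.List.pyRepeat [p.2] (pivot + 1 - |p.1 - pivot|)) := by
  induction rest with
  | nil => intro k s idx _; simp [PySem.List.enumerate_nil]
  | cons c cs ih =>
    intro k s idx hinv
    rw [PySem.List.enumerate_cons, List.foldl_cons, List.map_cons]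
    by_cases hk : k ≤ pivot
    · have : oddStretchStepA pivot (s, idx) (k, c)
          = (s ++ [PySem.List.pyRepeat [c] (k + 1)], idx ++ [k + 1]) := by
        simp [oddStretchStepA, hk]
      rw [this, ih (k + 1) _ _ (by
        intro h
        rw [pyGetD_append_singleton_neg_one]
        omega)]
      have hcnt : pivot + 1 - |k - pivot| = k + 1 := by
        rw [abs_of_nonpos (by omega)]; omega
      rw [hcnt]; simp
    · have hlast := hinv (by omega)
      have : oddStretchStepA pivot (s, idx) (k, c)
          = (s ++ [PySem.List.pyRepeat [c] (2 * pivot + 1 - k)],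
             idx.dropLast ++ [2 * pivot + 1 - k]) := by
        simp only [oddStretchStepA]
        rw [if_neg hk, hlast]
        have hj : 2 * pivot + 2 - k - 1 = 2 * pivot + 1 - k := by omega
        rw [hj]
      rw [this, ih (k + 1) _ _ (by
        intro h
        rw [pyGetD_append_singleton_neg_one]
        omega)]
      have hcnt : pivot + 1 - |k - pivot| = 2 * pivot + 1 - k := by
        rw [abs_of_nonneg (by omega)]; omega
      rw [hcnt]; simp

-- ===== VERDICT (by name: the statement is the Claim_ definition above) =====
theorem odd_stretch_spec : Claim_equal_odd_stretch := by
  intro txt _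
  unfold Spec_odd_stretch odd_stretch odd_stretch_alt
  have hpiv : 0 ≤ PySem.Int.floordiv ((txt.toList.length : Int)) 2 := by
    rw [PySem.Int.floordiv_eq_ediv_of_pos (by omega)]
    positivity
  dsimp only
  rw [oddStretch_loop _ _ 0 [] [] (by intro h; omega)]
  simp
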